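-- pv_equiv track=rewrite | github.com/arahant/qc-qosf-22-1 | algorithm.py | get_qubit
-- ===== SOURCE A (Python) =====
-- def get_qubit(state, bot, size):
--     qubit = ''
--     for i in range(size):
--         if i+1 in state:
--             qubit += '1'
--         elif i+1 in bot:
--             qubit += '0'
--         else:
--             qubit += 'x'
--     return qubit
-- ===== SOURCE B (Python) =====
-- def get_qubit(state, bot, size):
--     # Scatter marked positions instead of scanning both lists per position.
--     result = ['x'] * size if size > 0 else []
--     for v in bot:
--         if 1 <= v <= size:
--             result[v - 1] = '0'
--     for v in state:
--         if 1 <= v <= size: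
--             result[v - 1] = '1'
--     return ''.join(result)
-- ===== Notes on version B (the rewrite author's own statement) =====
-- stated objective: alternative
-- what changed: Replaces the per-position membership scans over state and bot with a single scatter pass: allocate a list of 'x', write '0' at in-range bot positions, then '1' at in-range state positions, and join.
import Mathlib
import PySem

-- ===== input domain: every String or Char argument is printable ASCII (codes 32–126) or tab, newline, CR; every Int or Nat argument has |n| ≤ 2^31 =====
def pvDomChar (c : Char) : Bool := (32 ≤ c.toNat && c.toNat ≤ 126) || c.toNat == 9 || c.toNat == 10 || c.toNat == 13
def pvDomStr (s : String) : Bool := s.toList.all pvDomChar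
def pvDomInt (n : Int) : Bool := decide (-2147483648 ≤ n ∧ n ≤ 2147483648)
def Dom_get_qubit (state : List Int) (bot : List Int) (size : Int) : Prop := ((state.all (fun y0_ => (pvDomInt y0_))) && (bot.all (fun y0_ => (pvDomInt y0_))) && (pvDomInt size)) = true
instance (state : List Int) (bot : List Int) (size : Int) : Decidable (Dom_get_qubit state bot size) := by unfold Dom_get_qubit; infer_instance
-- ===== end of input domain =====

-- B replaces A's per-position membership scans with one scatter pass (write '0' at bot
-- positions, then '1' at state positions, into a preallocated 'x' buffer).

-- ===== PORT A =====
def get_qubit (state : List Int) (bot : List Int) (size : Int) : String :=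
  (PySem.List.pyRange 0 size 1).foldl
    (fun q i => q ++ (if i + 1 ∈ state then "1" else if i + 1 ∈ bot then "0" else "x")) ""

-- ===== PORT B =====
def get_qubit_alt (state : List Int) (bot : List Int) (size : Int) : String :=
  String.ofList
    (state.foldl (fun r v => if 1 ≤ v ∧ v ≤ size then r.set (v - 1).toNat '1' else r)
      (bot.foldl (fun r v => if 1 ≤ v ∧ v ≤ size then r.set (v - 1).toNat '0' else r)
        (if 0 < size then List.replicate size.toNat 'x' else [])))

-- ===== PRECONDITION & SPEC =====
def Spec_get_qubit (state : List Int) (bot : List Int) (size : Int) (out : String) : Prop := out = get_qubit_alt state bot size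
instance (state : List Int) (bot : List Int) (size : Int) (out : String) : Decidable (Spec_get_qubit state bot size out) := by unfold Spec_get_qubit; infer_instance

-- ===== CLAIM (what is proved, stated in full; the proofs are below) =====
def Claim_equal_get_qubit : Prop := ∀ (state : List Int) (bot : List Int) (size : Int), Dom_get_qubit state bot size → Spec_get_qubit state bot size (get_qubit state bot size)

-- ===== LEMMAS AND PROOFS =====

/-- A scatter pass preserves the buffer length. -/
theorem pv_scatter_length (vs : List Int) (size : Int) (c : Char) (l : List Char) :
    (vs.foldl (fun r v => if 1 ≤ v ∧ v ≤ size then r.set (v - 1).toNat c else r) l).length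
      = l.length := by
  induction vs generalizing l with
  | nil => rfl
  | cons v vs ih =>
    simp only [List.foldl_cons]
    split
    · rw [ih, List.length_set]
    · rw [ih]

/-- Pointwise value of a scatter pass: position `i` (with `i+1 ≤ size`) holds `c`
    iff `i+1` occurs in `vs`, else the old value. -/
theorem pv_scatter_getElem? (vs : List Int) (size : Int) (c : Char) (l : List Char)
    (i : Nat) (hsz : (i : Int) + 1 ≤ size) :
    (vs.foldl (fun r v => if 1 ≤ v ∧ v ≤ size then r.set (v - 1).toNat c else r) l)[i]?
      = if ((i : Int) + 1) ∈ vs then (if i < l.length then some c else none) else l[i]? := by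
  induction vs generalizing l with
  | nil => simp
  | cons v vs ih =>
    simp only [List.foldl_cons, List.mem_cons]
    split
    · rename_i hv
      rw [ih (l.set (v - 1).toNat c)]
      by_cases hvi : v = (i : Int) + 1
      · subst hvi
        by_cases hmem : ((i : Int) + 1) ∈ vs
        · simp [hmem, List.length_set]
        · simp [hmem, List.getElem?_set_self']
          by_cases hl : i < l.length
          · simp [hl]
          · simp [hl]
      · have hne : (v - 1).toNat ≠ i := by omega
        rw [List.getElem?_set_ne hne, List.length_set]
        simp [show ¬((i : Int) + 1 = v) from fun h => hvi h.symm]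
    · rename_i hv
      rw [ih l]
      have hvi : ¬((i : Int) + 1 = v) := by omega
      simp [hvi]

/-- The qubit character decided at (0-based) position `i`. -/
def pvChar (state : List Int) (bot : List Int) (i : Int) : Char :=
  if i + 1 ∈ state then '1' else if i + 1 ∈ bot then '0' else 'x'

theorem pv_A_eq (state : List Int) (bot : List Int) (size : Int) :
    get_qubit state bot size
      = String.ofList ((PySem.List.pyRange 0 size 1).map (pvChar state bot)) := by
  unfold get_qubit
  have h : ∀ (l : List Int) (s : String),
      l.foldl (fun q i => q ++ (if i + 1 ∈ state then "1" else if i + 1 ∈ bot then "0" else "x")) s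
        = String.ofList (s.toList ++ l.map (pvChar state bot)) := by
    intro l
    induction l with
    | nil => intro s; simp
    | cons x l ih =>
      intro s
      simp only [List.foldl_cons, List.map_cons, ih, String.toList_append]
      have hc : (if x + 1 ∈ state then "1" else if x + 1 ∈ bot then "0" else "x").toList
          = [pvChar state bot x] := by
        unfold pvChar; split_ifs <;> rfl
      rw [hc]
      simp
  rw [h]
  rfl

theorem pv_B_list (state : List Int) (bot : List Int) (size : Int) :
    get_qubit_alt state bot size
      = String.ofList ((PySem.List.pyRange 0 size 1).map (pvChar state bot)) := by
  unfold get_qubit_alt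
  congr 1
  set init : List Char := if 0 < size then List.replicate size.toNat 'x' else [] with hinit
  have hlen : init.length = size.toNat := by
    rw [hinit]; split <;> simp
    omega
  have hlen1 : (bot.foldl (fun r v => if 1 ≤ v ∧ v ≤ size then r.set (v - 1).toNat '0' else r) init).length = size.toNat := by
    rw [pv_scatter_length, hlen]
  have hlen2 : (state.foldl (fun r v => if 1 ≤ v ∧ v ≤ size then r.set (v - 1).toNat '1' else r)
      (bot.foldl (fun r v => if 1 ≤ v ∧ v ≤ size then r.set (v - 1).toNat '0' else r) init)).length = size.toNat := by
    rw [pv_scatter_length, hlen1]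
  apply List.ext_getElem?
  intro i
  rw [List.getElem?_map]
  by_cases hi : i < size.toNat
  · have hsz : (i : Int) + 1 ≤ size := by omega
    rw [pv_scatter_getElem? state size '1' _ i hsz,
        pv_scatter_getElem? bot size '0' init i hsz]
    have hpy : (PySem.List.pyRange 0 size 1)[i]? = some ((i : Nat) : Int) := by
      rw [PySem.List.pyRange_one]
      rw [List.getElem?_map, List.getElem?_range (by omega : i < (size - 0).toNat)]
      simp
    rw [hpy]
    have hinitget : init[i]? = some 'x' := by
      rw [hinit, if_pos (by omega : 0 < size), List.getElem?_replicate, if_pos hi]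
    unfold pvChar
    by_cases hs : ((i : Int) + 1) ∈ state
    · rw [if_pos hs, if_pos (by rw [hlen1]; exact hi)]
      simp [hs]
    · rw [if_neg hs]
      by_cases hb : ((i : Int) + 1) ∈ bot
      · rw [if_pos hb, if_pos (by rw [hlen]; exact hi)]
        simp [hs, hb]
      · rw [if_neg hb, hinitget]
        simp [hs, hb]
  · rw [List.getElem?_eq_none (by rw [hlen2]; omega),
        List.getElem?_eq_none (by rw [PySem.List.length_pyRange_one]; omega)]
    rfl

-- ===== VERDICT (by name: the statement is the Claim_ definition above) =====
theorem get_qubit_spec : Claim_equal_get_qubit := by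
  intro state bot size _
  unfold Spec_get_qubit
  rw [pv_A_eq, pv_B_list]
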